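-- pv_equiv track=rewrite | github.com/park-1927/course | 블록체인/10월 21일/What_is_sha256-without lib.py | sha256_custom
-- ===== SOURCE A (Python) =====
-- h_init = [
--     0x6a09e667, 0xbb67ae85, 0x3c6ef372, 0xa54ff53a,
--     0x510e527f, 0x9b05688c, 0x1f83d9ab, 0x5be0cd19
-- ]
--
-- k_const = [
--     0x428a2f98, 0x71374491, 0xb5c0fbcf, 0xe9b5dba5, 0x3956c25b, 0x59f111f1, 0x923f82a4, 0xab1c5ed5,
--     0xd807aa98, 0x12835b01, 0x243185be, 0x550c7dc3, 0x72be5d74, 0x80deb1fe, 0x9bdc06a7, 0xc19bf174,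
--     0xe49b69c1, 0xefbe4786, 0x0fc19dc6, 0x240ca1cc, 0x2de92c6f, 0x4a7484aa, 0x5cb0a9dc, 0x76f988da,
--     0x983e5152, 0xa831c66d, 0xb00327c8, 0xbf597fc7, 0xc6e00bf3, 0xd5a79147, 0x06ca6351, 0x14292967,
--     0x27b70a85, 0x2e1b2138, 0x4d2c6dfc, 0x53380d13, 0x650a7354, 0x766a0abb, 0x81c2c92e, 0x92722c85,
--     0xa2bfe8a1, 0xa81a664b, 0xc24b8b70, 0xc76c51a3, 0xd192e819, 0xd6990624, 0xf40e3585, 0x106aa070,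
--     0x19a4c116, 0x1e376c08, 0x2748774c, 0x34b0bcb5, 0x391c0cb3, 0x4ed8aa4a, 0x5b9cca4f, 0x682e6ff3,
--     0x748f82ee, 0x78a5636f, 0x84c87814, 0x8cc70208, 0x90befffa, 0xa4506ceb, 0xbef9a3f7, 0xc67178f2
-- ]
--
-- def _rotr(x, n): return (x >> n) | (x << (32 - n)) & 0xFFFFFFFF
--
-- def _shr(x, n): return (x >> n)
--
-- def _ch(x, y, z): return (x & y) ^ (~x & z)
--
-- def _maj(x, y, z): return (x & y) ^ (x & z) ^ (y & z)
--
-- def _sigma0(x): return _rotr(x, 2) ^ _rotr(x, 13) ^ _rotr(x, 22)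
--
-- def _sigma1(x): return _rotr(x, 6) ^ _rotr(x, 11) ^ _rotr(x, 25)
--
-- def _capsigma0(x): return _rotr(x, 7) ^ _rotr(x, 18) ^ _shr(x, 3)
--
-- def _capsigma1(x): return _rotr(x, 17) ^ _rotr(x, 19) ^ _shr(x, 10)
--
-- def sha256_custom(message):
--
--     # 3. 메시지 전처리 및 패딩
--     # 메시지를 바이트로 변환하고 1을 추가, 512비트의 배수로 만듬
--
--     message_bytes = message.encode('utf-8')
--     ml = len(message_bytes) * 8
--     message_bytes += b'\x80'
--     while (len(message_bytes) * 8) % 512 != 448: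
--         message_bytes += b'\x00'
--     message_bytes += ml.to_bytes(8, 'big')
--
--     # 4. 해시 계산
--     h = list(h_init)
--     for i in range(0, len(message_bytes), 64):
--         chunk = message_bytes[i:i+64]
--         words = list(int.from_bytes(chunk[j:j+4], 'big') for j in range(0, 64, 4))
--
--         # 64개의 워드 배열 확장
--         for t in range(16, 64):
--             s0 = _capsigma0(words[t-15])
--             s1 = _capsigma1(words[t-2])
--             words.append((words[t-16] + s0 + words[t-7] + s1) & 0xFFFFFFFF)
--
--         a, b, c, d, e, f, g, hh = h[:] # 현재 해시값을 임시 변수에 복사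
--
--         # 64라운드 압축 함수 실행
--         for t in range(64):
--             t1 = (hh + _sigma1(e) + _ch(e, f, g) + k_const[t] + words[t]) & 0xFFFFFFFF
--             t2 = (_sigma0(a) + _maj(a, b, c)) & 0xFFFFFFFF
--             hh, g, f, e, d, c, b, a = g, f, e, (d + t1) & 0xFFFFFFFF, c, b, a, (t1 + t2) & 0xFFFFFFFF
--
--         # 라운드 결과값 누적
--         h = [(h[j] + [a, b, c, d, e, f, g, hh][j]) & 0xFFFFFFFF for j in range(8)]
--
--     # 5. 최종 해시값 생성
--     return ''.join(f'{x:08x}' for x in h)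
-- ===== SOURCE B (Python) =====
-- import hashlib
--
-- def sha256_custom(message):
--     return hashlib.sha256(message.encode('utf-8')).hexdigest()
-- ===== Notes on version B (the rewrite author's own statement) =====
-- stated objective: idiomatic
-- what changed: Replaced the hand-rolled padding/schedule/compression loops with a single call to hashlib.sha256(...).hexdigest(), keeping the explicit UTF-8 encoding step.
import Mathlib
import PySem

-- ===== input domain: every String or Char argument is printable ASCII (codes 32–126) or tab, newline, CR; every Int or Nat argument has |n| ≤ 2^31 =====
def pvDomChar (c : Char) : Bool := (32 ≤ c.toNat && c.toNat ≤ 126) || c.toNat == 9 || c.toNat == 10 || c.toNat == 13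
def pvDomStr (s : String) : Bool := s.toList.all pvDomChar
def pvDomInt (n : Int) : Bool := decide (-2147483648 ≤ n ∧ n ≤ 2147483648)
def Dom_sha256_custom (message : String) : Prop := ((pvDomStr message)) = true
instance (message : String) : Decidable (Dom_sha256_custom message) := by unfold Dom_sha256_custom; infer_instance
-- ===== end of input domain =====

-- B replaces A's hand-rolled padding loop, schedule-expansion pass and indexed compression loop by the
-- idiomatic library call hashlib.sha256(...).hexdigest(); its Lean port is the corresponding clean SHA-256
-- (closed-form padding, recursive chunking, fused rolling-window rounds), since no library SHA-256 exists in Lean.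

-- ===== PORT A =====
-- shared module-level constants of Source A
def hInit : List Nat := [0x6a09e667, 0xbb67ae85, 0x3c6ef372, 0xa54ff53a,
                         0x510e527f, 0x9b05688c, 0x1f83d9ab, 0x5be0cd19]

def kConst : List Nat := [0x428a2f98, 0x71374491, 0xb5c0fbcf, 0xe9b5dba5, 0x3956c25b, 0x59f111f1, 0x923f82a4, 0xab1c5ed5,
  0xd807aa98, 0x12835b01, 0x243185be, 0x550c7dc3, 0x72be5d74, 0x80deb1fe, 0x9bdc06a7, 0xc19bf174,
  0xe49b69c1, 0xefbe4786, 0x0fc19dc6, 0x240ca1cc, 0x2de92c6f, 0x4a7484aa, 0x5cb0a9dc, 0x76f988da,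
  0x983e5152, 0xa831c66d, 0xb00327c8, 0xbf597fc7, 0xc6e00bf3, 0xd5a79147, 0x06ca6351, 0x14292967,
  0x27b70a85, 0x2e1b2138, 0x4d2c6dfc, 0x53380d13, 0x650a7354, 0x766a0abb, 0x81c2c92e, 0x92722c85,
  0xa2bfe8a1, 0xa81a664b, 0xc24b8b70, 0xc76c51a3, 0xd192e819, 0xd6990624, 0xf40e3585, 0x106aa070,
  0x19a4c116, 0x1e376c08, 0x2748774c, 0x34b0bcb5, 0x391c0cb3, 0x4ed8aa4a, 0x5b9cca4f, 0x682e6ff3,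
  0x748f82ee, 0x78a5636f, 0x84c87814, 0x8cc70208, 0x90befffa, 0xa4506ceb, 0xbef9a3f7, 0xc67178f2]

-- module helpers of Source A (all call sites pass x < 2^32, where these are exact)
def rotr (x n : Nat) : Nat := (x >>> n) ||| ((x <<< (32 - n)) &&& 0xFFFFFFFF)
def shr (x n : Nat) : Nat := x >>> n
-- Python's ~x & z for 0 ≤ x < 2^32 and z < 2^32 equals (2^32 - 1 - x) &&& z (bitwise complement on 32 bits)
def ch (x y z : Nat) : Nat := (x &&& y) ^^^ ((0xFFFFFFFF - x) &&& z)
def maj (x y z : Nat) : Nat := (x &&& y) ^^^ (x &&& z) ^^^ (y &&& z)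
def sigma0 (x : Nat) : Nat := rotr x 2 ^^^ rotr x 13 ^^^ rotr x 22
def sigma1 (x : Nat) : Nat := rotr x 6 ^^^ rotr x 11 ^^^ rotr x 25
def capsigma0 (x : Nat) : Nat := rotr x 7 ^^^ rotr x 18 ^^^ shr x 3
def capsigma1 (x : Nat) : Nat := rotr x 17 ^^^ rotr x 19 ^^^ shr x 10

-- ml.to_bytes(8, 'big')  (hand port of the builtin; exact for ml < 2^64, which holds for every real string)
def toBytesBE : Nat → Nat → List Nat
  | 0, _ => []
  | k + 1, n => toBytesBE k (n / 256) ++ [n % 256]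

-- int.from_bytes(bs, 'big')  (hand port of the builtin; exact)
def fromBytesBE (bs : List Nat) : Nat := bs.foldl (fun acc b => acc * 256 + b) 0

-- f'{x:08x}'  (hand port of the format builtin; exact for x < 2^32)
def hex8 (x : Nat) : String := String.ofList (List.replicate (8 - (Nat.toDigits 16 x).length) '0' ++ Nat.toDigits 16 x)

-- the 'while (len(message_bytes) * 8) % 512 != 448: message_bytes += b"\x00"' loop of A; the loop
-- appends at most 63 zero bytes, so a fuel of 64 only makes the recursion structural (never exhausted)
def padLoop : Nat → List Nat → List Nat
  | 0, bs => bs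
  | fuel + 1, bs => if (bs.length * 8) % 512 ≠ 448 then padLoop fuel (bs ++ [0]) else bs

def sha256_custom (message : String) : String :=
  -- message.encode('utf-8'): exact on Dom (ASCII incl. tab/newline/CR: one byte per char, value = code point)
  let messageBytes := message.toList.map Char.toNat
  let ml := messageBytes.length * 8
  let messageBytes := messageBytes ++ [0x80]
  let messageBytes := padLoop 64 messageBytes
  let messageBytes := messageBytes ++ toBytesBE 8 ml
  let h := hInit
  let h := (PySem.List.pyRange 0 (messageBytes.length : Int) 64).foldl (fun h i =>
    let chunk := PySem.List.slice messageBytes (some i) (some (i + 64))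
    let words := (PySem.List.pyRange 0 64 4).map
      (fun j => fromBytesBE (PySem.List.slice chunk (some j) (some (j + 4))))
    let words := (PySem.List.pyRange 16 64 1).foldl (fun ws t =>
      let s0 := capsigma0 (PySem.List.pyGetD ws (t - 15) 0)
      let s1 := capsigma1 (PySem.List.pyGetD ws (t - 2) 0)
      ws ++ [(PySem.List.pyGetD ws (t - 16) 0 + s0 + PySem.List.pyGetD ws (t - 7) 0 + s1) &&& 0xFFFFFFFF]) words
    -- a, b, c, d, e, f, g, hh = h[:]
    let st := (PySem.List.pyGetD h 0 0, PySem.List.pyGetD h 1 0, PySem.List.pyGetD h 2 0,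
               PySem.List.pyGetD h 3 0, PySem.List.pyGetD h 4 0, PySem.List.pyGetD h 5 0,
               PySem.List.pyGetD h 6 0, PySem.List.pyGetD h 7 0)
    let st := (PySem.List.pyRange 0 64 1).foldl (fun st t =>
      match st with
      | (a, b, c, d, e, f, g, hh) =>
        let t1 := (hh + sigma1 e + ch e f g + PySem.List.pyGetD kConst t 0 + PySem.List.pyGetD words t 0) &&& 0xFFFFFFFF
        let t2 := (sigma0 a + maj a b c) &&& 0xFFFFFFFF
        ((t1 + t2) &&& 0xFFFFFFFF, a, b, c, (d + t1) &&& 0xFFFFFFFF, e, f, g)) st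
    match st with
    | (a, b, c, d, e, f, g, hh) =>
      (PySem.List.pyRange 0 8 1).map (fun j =>
        (PySem.List.pyGetD h j 0 + PySem.List.pyGetD [a, b, c, d, e, f, g, hh] j 0) &&& 0xFFFFFFFF)) h
  PySem.Str.join "" (h.map hex8)

-- ===== PORT B =====
-- port of Source B's hashlib.sha256(message.encode('utf-8')).hexdigest(): a clean SHA-256 with closed-form
-- padding, recursive 64-byte chunking, and a fused 64-round loop over a rolling 16-word schedule window.

abbrev St8 : Type := Nat × Nat × Nat × Nat × Nat × Nat × Nat × Nat

-- big-endian 32-bit words of a chunk, four bytes at a time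
def toWords : List Nat → List Nat
  | b0 :: b1 :: b2 :: b3 :: rest => (b0 * 16777216 + b1 * 65536 + b2 * 256 + b3) :: toWords rest
  | _ => []

-- one SHA-256 round
def rnd (st : St8) (k w : Nat) : St8 :=
  match st with
  | (a, b, c, d, e, f, g, hh) =>
    let t1 := (hh + sigma1 e + ch e f g + k + w) &&& 0xFFFFFFFF
    let t2 := (sigma0 a + maj a b c) &&& 0xFFFFFFFF
    ((t1 + t2) &&& 0xFFFFFFFF, a, b, c, (d + t1) &&& 0xFFFFFFFF, e, f, g)

-- slide the 16-word schedule window one position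
def roll (w : List Nat) : List Nat :=
  w.tail ++ [(w.getD 0 0 + capsigma0 (w.getD 1 0) + w.getD 9 0 + capsigma1 (w.getD 14 0)) &&& 0xFFFFFFFF]

-- fused rounds: consume one round constant and the window head per step, rolling the window
def rounds : List Nat → List Nat → St8 → St8
  | [], _, st => st
  | k :: ks, w, st => rounds ks (roll w) (rnd st k (w.getD 0 0))

def compress (hv : St8) (chunk : List Nat) : St8 :=
  match hv, rounds kConst (toWords chunk) hv with
  | (h0, h1, h2, h3, h4, h5, h6, h7), (a, b, c, d, e, f, g, hh) =>
    ((h0 + a) &&& 0xFFFFFFFF, (h1 + b) &&& 0xFFFFFFFF, (h2 + c) &&& 0xFFFFFFFF, (h3 + d) &&& 0xFFFFFFFF,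
     (h4 + e) &&& 0xFFFFFFFF, (h5 + f) &&& 0xFFFFFFFF, (h6 + g) &&& 0xFFFFFFFF, (h7 + hh) &&& 0xFFFFFFFF)

def chunks64 (bs : List Nat) : List (List Nat) :=
  if bs = [] then [] else bs.take 64 :: chunks64 (bs.drop 64)
termination_by bs.length
decreasing_by have h : 0 < bs.length := List.length_pos_of_ne_nil (by assumption); simp [List.length_drop]; omega

def sha256_custom_alt (message : String) : String :=
  let bytes := message.toList.map Char.toNat   -- utf-8 bytes (ASCII domain)
  let n := bytes.length
  let padded := bytes ++ 0x80 :: (List.replicate ((120 - (n + 1) % 64) % 64) 0 ++ toBytesBE 8 (n * 8))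
  match (chunks64 padded).foldl compress
      (0x6a09e667, 0xbb67ae85, 0x3c6ef372, 0xa54ff53a, 0x510e527f, 0x9b05688c, 0x1f83d9ab, 0x5be0cd19) with
  | (a, b, c, d, e, f, g, hh) => PySem.Str.join "" ([a, b, c, d, e, f, g, hh].map hex8)

-- ===== PRECONDITION & SPEC =====
def Spec_sha256_custom (message : String) (out : String) : Prop := out = sha256_custom_alt message
instance (message : String) (out : String) : Decidable (Spec_sha256_custom message out) := by unfold Spec_sha256_custom; infer_instance

-- ===== CLAIM (what is proved, stated in full; the proofs are below) =====
def Claim_equal_sha256_custom : Prop := ∀ (message : String), Dom_sha256_custom message → Spec_sha256_custom message (sha256_custom message)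

-- ===== LEMMAS AND PROOFS =====

-- proof-side helpers: A's per-chunk body abstracted over the chunk, and A's whole run over the raw bytes
def list8 (t : St8) : List Nat := [t.1, t.2.1, t.2.2.1, t.2.2.2.1, t.2.2.2.2.1, t.2.2.2.2.2.1, t.2.2.2.2.2.2.1, t.2.2.2.2.2.2.2]

def procA (h chunk : List Nat) : List Nat :=
  let words := (PySem.List.pyRange 0 64 4).map
    (fun j => fromBytesBE (PySem.List.slice chunk (some j) (some (j + 4))))
  let words := (PySem.List.pyRange 16 64 1).foldl (fun ws t =>
    let s0 := capsigma0 (PySem.List.pyGetD ws (t - 15) 0)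
    let s1 := capsigma1 (PySem.List.pyGetD ws (t - 2) 0)
    ws ++ [(PySem.List.pyGetD ws (t - 16) 0 + s0 + PySem.List.pyGetD ws (t - 7) 0 + s1) &&& 0xFFFFFFFF]) words
  let st := (PySem.List.pyGetD h 0 0, PySem.List.pyGetD h 1 0, PySem.List.pyGetD h 2 0,
             PySem.List.pyGetD h 3 0, PySem.List.pyGetD h 4 0, PySem.List.pyGetD h 5 0,
             PySem.List.pyGetD h 6 0, PySem.List.pyGetD h 7 0)
  let st := (PySem.List.pyRange 0 64 1).foldl
    (fun st t => rnd st (PySem.List.pyGetD kConst t 0) (PySem.List.pyGetD words t 0)) st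
  (PySem.List.pyRange 0 8 1).map (fun j =>
    (PySem.List.pyGetD h j 0 + PySem.List.pyGetD (list8 st) j 0) &&& 0xFFFFFFFF)

def runA (bs : List Nat) : String :=
  let p := padLoop 64 (bs ++ [0x80]) ++ toBytesBE 8 (bs.length * 8)
  PySem.Str.join ""
    (((PySem.List.pyRange 0 (p.length : Int) 64).foldl
        (fun h i => procA h (PySem.List.slice p (some i) (some (i + 64)))) hInit).map hex8)

def runB (bs : List Nat) : String :=
  let padded := bs ++ 0x80 :: (List.replicate ((120 - (bs.length + 1) % 64) % 64) 0 ++ toBytesBE 8 (bs.length * 8))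
  match (chunks64 padded).foldl compress
      (0x6a09e667, 0xbb67ae85, 0x3c6ef372, 0xa54ff53a, 0x510e527f, 0x9b05688c, 0x1f83d9ab, 0x5be0cd19) with
  | (a, b, c, d, e, f, g, hh) => PySem.Str.join "" ([a, b, c, d, e, f, g, hh].map hex8)

lemma runA_eq (message : String) : sha256_custom message = runA (message.toList.map Char.toNat) := rfl

lemma runB_eq (message : String) : sha256_custom_alt message = runB (message.toList.map Char.toNat) := rfl

-- the padding while-loop appends exactly (120 - len % 64) % 64 zero bytes
lemma padLoop_eq_aux : ∀ (k fuel : Nat) (bs : List Nat), k ≤ fuel → (120 - bs.length % 64) % 64 = k →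
    padLoop fuel bs = bs ++ List.replicate k 0 := by
  intro k
  induction k with
  | zero =>
    intro fuel bs _ h
    cases fuel with
    | zero => simp [padLoop]
    | succ f =>
      rw [padLoop, if_neg (by omega)]
      simp
  | succ k ih =>
    intro fuel bs hle h
    cases fuel with
    | zero => omega
    | succ f =>
      rw [padLoop, if_pos (by omega), ih f (bs ++ [0]) (by omega) (by simp; omega)]
      simp [List.replicate_succ]

lemma padLoop_eq (bs : List Nat) : padLoop 64 bs = bs ++ List.replicate ((120 - bs.length % 64) % 64) 0 :=
  padLoop_eq_aux _ 64 bs (by omega) rfl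

-- one schedule-extension step of A (appends the next word computed from absolute positions len-16, len-15, len-7, len-2)
def app (ws : List Nat) : List Nat :=
  ws ++ [(ws.getD (ws.length - 16) 0 + capsigma0 (ws.getD (ws.length - 15) 0) +
          ws.getD (ws.length - 7) 0 + capsigma1 (ws.getD (ws.length - 2) 0)) &&& 0xFFFFFFFF]

lemma length_app_iter (n : Nat) (ws : List Nat) : (app^[n] ws).length = ws.length + n := by
  induction n with
  | zero => simp
  | succ n ih => rw [Function.iterate_succ_apply', app]; simp [ih]; omega

lemma getD_app_iter (n : Nat) (ws : List Nat) (i : Nat) (h : i < ws.length) :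
    (app^[n] ws).getD i 0 = ws.getD i 0 := by
  induction n generalizing ws with
  | zero => rfl
  | succ n ih =>
    rw [Function.iterate_succ_apply, ih (app ws) (by simp [app]; omega), app,
      List.getD_append _ _ _ _ h]

lemma drop_app_iter (n : Nat) (w : List Nat) (hw : w.length = 16) :
    (app^[n] w).drop n = roll^[n] w := by
  induction n with
  | zero => simp
  | succ n ih =>
    rw [Function.iterate_succ_apply' (f := app), Function.iterate_succ_apply' (f := roll), ← ih]
    have hY : (app^[n] w).length = 16 + n := by rw [length_app_iter, hw]
    rw [app, List.drop_append_of_le_length (by omega), roll]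
    have hg : ∀ i : Nat, ((app^[n] w).drop n).getD i 0 = (app^[n] w).getD (n + i) 0 := by
      intro i; simp [List.getD_eq_getElem?_getD, List.getElem?_drop]
    rw [List.tail_drop, hg 0, hg 1, hg 9, hg 14, hY]
    have e0 : 16 + n - 16 = n + 0 := by omega
    have e1 : 16 + n - 15 = n + 1 := by omega
    have e9 : 16 + n - 7 = n + 9 := by omega
    have e14 : 16 + n - 2 = n + 14 := by omega
    rw [e0, e1, e9, e14]

lemma schedHead (w : List Nat) (hw : w.length = 16) (t : Nat) (ht : t < 64) :
    (app^[48] w).getD t 0 = (roll^[t] w).getD 0 0 := by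
  have key : (app^[t] w).getD t 0 = (roll^[t] w).getD 0 0 := by
    rw [← drop_app_iter t w hw]
    simp [List.getD_eq_getElem?_getD, List.getElem?_drop]
  rcases Nat.lt_or_ge 48 t with h | h
  · have h48 : (t : Nat) = (t - 48) + 48 := by omega
    have h2 : (app^[t] w).getD t 0 = (app^[48] w).getD t 0 := by
      calc (app^[t] w).getD t 0 = (app^[t - 48 + 48] w).getD t 0 := by rw [← h48]
        _ = (app^[t - 48] (app^[48] w)).getD t 0 := by rw [Function.iterate_add_apply]
        _ = (app^[48] w).getD t 0 := getD_app_iter _ _ _ (by rw [length_app_iter, hw]; omega)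
    rw [← h2, key]
  · have h48 : (48 : Nat) = (48 - t) + t := by omega
    calc (app^[48] w).getD t 0 = (app^[48 - t] (app^[t] w)).getD t 0 := by
          rw [← Function.iterate_add_apply, ← h48]
      _ = (app^[t] w).getD t 0 := getD_app_iter _ _ _ (by rw [length_app_iter, hw]; omega)
      _ = (roll^[t] w).getD 0 0 := key

-- A's schedule-expansion foldl is 48 iterations of app
lemma expandFold : ∀ (n j : Nat) (ws : List Nat), ws.length = 16 + j →
    List.foldl (fun ws (t : Int) =>
      let s0 := capsigma0 (PySem.List.pyGetD ws (t - 15) 0)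
      let s1 := capsigma1 (PySem.List.pyGetD ws (t - 2) 0)
      ws ++ [(PySem.List.pyGetD ws (t - 16) 0 + s0 + PySem.List.pyGetD ws (t - 7) 0 + s1) &&& 0xFFFFFFFF])
      ws ((List.range n).map (fun k => (16 : Int) + ↑(j + k)))
    = app^[n] ws := by
  intro n
  induction n with
  | zero => intro j ws _; simp
  | succ n ih =>
    intro j ws h
    rw [List.range_succ_eq_map, List.map_cons, List.map_map, List.foldl_cons,
      Function.iterate_succ_apply]
    have c16 : ((16 : Int) + ↑(j + 0) - 16) = ((j : Nat) : Int) := by push_cast; ring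
    have c15 : ((16 : Int) + ↑(j + 0) - 15) = ((j + 1 : Nat) : Int) := by push_cast; ring
    have c7 : ((16 : Int) + ↑(j + 0) - 7) = ((j + 9 : Nat) : Int) := by push_cast; ring
    have c2 : ((16 : Int) + ↑(j + 0) - 2) = ((j + 14 : Nat) : Int) := by push_cast; ring
    have happ : app ws = ws ++ [(ws.getD j 0 + capsigma0 (ws.getD (j + 1) 0) +
        ws.getD (j + 9) 0 + capsigma1 (ws.getD (j + 14) 0)) &&& 0xFFFFFFFF] := by
      rw [app, h]
      have e0 : 16 + j - 16 = j := by omega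
      have e1 : 16 + j - 15 = j + 1 := by omega
      have e9 : 16 + j - 7 = j + 9 := by omega
      have e14 : 16 + j - 2 = j + 14 := by omega
      rw [e0, e1, e9, e14]
    have hfn : ((fun k => (16 : Int) + ↑(j + k)) ∘ Nat.succ) = (fun k : Nat => (16 : Int) + ↑((j + 1) + k)) := by
      funext k
      simp only [Function.comp_apply]
      omega
    simp only [c16, c15, c7, c2, PySem.List.pyGetD_natCast, hfn, ← happ]
    exact ih (j + 1) (app ws) (by simp [app, h]; omega)

-- an index-driven fold over range n is the pair fold over the zipped lists
lemma foldIdx : ∀ (ks : List Nat) (n : Nat) (ws : List Nat) (st : St8), ks.length = n → ws.length = n →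
    List.foldl (fun st (k : Nat) => rnd st (ks.getD k 0) (ws.getD k 0)) st (List.range n)
    = List.foldl (fun st (p : Nat × Nat) => rnd st p.1 p.2) st (ks.zip ws) := by
  intro ks
  induction ks with
  | nil =>
    intro n ws st h1 _
    subst h1
    simp
  | cons k ks ih =>
    intro n ws st h1 h2
    subst h1
    cases ws with
    | nil => simp at h2
    | cons wv ws' =>
      simp only [List.length_cons]
      rw [List.range_succ_eq_map, List.foldl_cons, List.foldl_map, List.zip_cons_cons,
        List.foldl_cons]
      simp only [List.getD_cons_zero, List.getD_cons_succ]
      exact ih ks.length ws' _ rfl (by simpa using h2)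

-- B's fused rolling-window rounds are the same pair fold
lemma roundsEq : ∀ (ks ws w : List Nat) (st : St8), ws.length = ks.length →
    (∀ t, t < ks.length → ws.getD t 0 = (roll^[t] w).getD 0 0) →
    rounds ks w st = List.foldl (fun st (p : Nat × Nat) => rnd st p.1 p.2) st (ks.zip ws) := by
  intro ks
  induction ks with
  | nil =>
    intro ws w st h1 _
    simp [rounds]
  | cons k ks ih =>
    intro ws w st h1 h2
    cases ws with
    | nil => simp at h1
    | cons wv ws' =>
      have h0 : wv = w.getD 0 0 := by simpa using h2 0 (by simp)
      rw [List.zip_cons_cons, List.foldl_cons, rounds, h0]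
      exact ih ws' (roll w) _ (by simpa using h1) (fun t ht => by
        have := h2 (t + 1) (by simp; omega)
        simpa [Function.iterate_succ_apply] using this)

-- fold over chunk start indices = fold over the recursive chunk list
lemma chunkFold {St : Type} (g : St → List Nat → St) :
    ∀ (m : Nat) (bs : List Nat) (st : St), bs.length = 64 * m →
    List.foldl (fun st (k : Nat) => g st (List.take 64 (List.drop (64 * k) bs))) st (List.range m)
    = List.foldl g st (chunks64 bs) := by
  intro m
  induction m with
  | zero =>
    intro bs st h
    have hbs : bs = [] := List.eq_nil_iff_length_eq_zero.mpr (by omega)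
    subst hbs
    rw [chunks64]
    simp
  | succ m ih =>
    intro bs st h
    have hne : bs ≠ [] := by intro e; subst e; simp at h
    rw [chunks64, if_neg hne, List.range_succ_eq_map, List.foldl_cons, List.foldl_map,
      List.foldl_cons]
    have hd : ∀ k : Nat, List.drop (64 * Nat.succ k) bs = List.drop (64 * k) (List.drop 64 bs) := by
      intro k
      rw [List.drop_drop]
      congr 1
      omega
    simp only [Nat.mul_zero, List.drop_zero, hd]
    exact ih (bs.drop 64) _ (by simp [h]; omega)

lemma chunks64_len : ∀ (m : Nat) (bs : List Nat), bs.length = 64 * m → ∀ c ∈ chunks64 bs, c.length = 64 := by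
  intro m
  induction m with
  | zero =>
    intro bs h c hc
    have hbs : bs = [] := List.eq_nil_iff_length_eq_zero.mpr (by omega)
    subst hbs
    rw [chunks64] at hc
    simp at hc
  | succ m ih =>
    intro bs h c hc
    have hne : bs ≠ [] := by intro e; subst e; simp at h
    rw [chunks64, if_neg hne] at hc
    rcases List.mem_cons.mp hc with h1 | h1
    · subst h1
      simp
      omega
    · exact ih (bs.drop 64) (by simp [h]; omega) c h1

-- A's stride-4 slice map over a 64-byte chunk is B's recursive toWords
lemma toWords_eq : ∀ (n : Nat) (bs : List Nat), bs.length = 4 * n →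
    (List.range n).map (fun k => fromBytesBE (List.take 4 (List.drop (4 * k) bs))) = toWords bs := by
  intro n
  induction n with
  | zero =>
    intro bs h
    have hbs : bs = [] := List.eq_nil_iff_length_eq_zero.mpr (by omega)
    subst hbs
    simp [toWords]
  | succ n ih =>
    intro bs h
    obtain ⟨b0, bs, rfl⟩ : ∃ x l, bs = x :: l := by
      cases bs with
      | nil => simp at h
      | cons x l => exact ⟨x, l, rfl⟩
    obtain ⟨b1, bs, rfl⟩ : ∃ x l, bs = x :: l := by
      cases bs with
      | nil => simp at h; omega
      | cons x l => exact ⟨x, l, rfl⟩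
    obtain ⟨b2, bs, rfl⟩ : ∃ x l, bs = x :: l := by
      cases bs with
      | nil => simp at h; omega
      | cons x l => exact ⟨x, l, rfl⟩
    obtain ⟨b3, rest, rfl⟩ : ∃ x l, bs = x :: l := by
      cases bs with
      | nil => simp at h; omega
      | cons x l => exact ⟨x, l, rfl⟩
    rw [List.range_succ_eq_map, List.map_cons, List.map_map, toWords]
    have hd : ∀ k : Nat, List.drop (4 * Nat.succ k) (b0 :: b1 :: b2 :: b3 :: rest) =
        List.drop (4 * k) rest := by
      intro k
      rw [show 4 * Nat.succ k = 4 * k + 1 + 1 + 1 + 1 from by omega]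
      simp only [List.drop_succ_cons]
    refine List.cons_eq_cons.mpr ⟨?_, ?_⟩
    · simp [fromBytesBE]
      omega
    · simp only [Function.comp_def, hd]
      exact ih rest (by simp at h; omega)

-- per chunk: A's body on the list state is B's compress on the tuple state
lemma length_toBytesBE : ∀ (k n : Nat), (toBytesBE k n).length = k := by
  intro k
  induction k with
  | zero => intro n; rfl
  | succ k ih => intro n; rw [toBytesBE]; simp [ih]

set_option maxHeartbeats 2000000 in
lemma procA_compress (hv : St8) (c : List Nat) (hc : c.length = 64) :
    procA (list8 hv) c = list8 (compress hv c) := by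
  obtain ⟨h0, h1, h2, h3, h4, h5, h6, h7⟩ := hv
  unfold procA compress
  have hr4 : PySem.List.pyRange 0 64 4 = (List.range 16).map (fun k => (0 : Int) + 4 * ↑k) := by
    rw [PySem.List.pyRange_of_pos 0 64 (by norm_num)]
    norm_num
    rfl
  have hsl4 : ∀ k : Nat, PySem.List.slice c (some ((0 : Int) + 4 * ↑k)) (some ((0 : Int) + 4 * ↑k + 4)) =
      List.take 4 (List.drop (4 * k) c) := by
    intro k
    have e1 : (0 : Int) + 4 * ↑k = ((4 * k : Nat) : Int) := by push_cast; ring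
    have e2 : (0 : Int) + 4 * ↑k + 4 = ((4 * k : Nat) : Int) + ((4 : Nat) : Int) := by push_cast; ring
    rw [e2, e1, PySem.List.slice_natCast_add]
  rw [hr4, List.map_map]
  simp only [Function.comp_def, hsl4]
  rw [toWords_eq 16 c (by omega)]
  have hwlen : (toWords c).length = 16 := by
    rw [← toWords_eq 16 c (by omega)]
    simp
  have hr48 : PySem.List.pyRange 16 64 1 = (List.range 48).map (fun k => (16 : Int) + ↑(0 + k)) := by
    rw [PySem.List.pyRange_one]
    norm_num
    rfl
  rw [hr48, expandFold 48 0 (toWords c) (by omega)]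
  have hr64 : PySem.List.pyRange 0 64 1 = (List.range 64).map (fun k => ((k : Nat) : Int)) := by
    rw [PySem.List.pyRange_one]
    norm_num
    rfl
  rw [hr64, List.foldl_map]
  simp only [PySem.List.pyGetD_natCast]
  have hW : ∀ t, t < kConst.length → (app^[48] (toWords c)).getD t 0 = (roll^[t] (toWords c)).getD 0 0 := by
    intro t ht
    exact schedHead (toWords c) hwlen t (by simpa [kConst] using ht)
  rw [foldIdx kConst 64 (app^[48] (toWords c)) _ rfl (by rw [length_app_iter, hwlen]),
    ← roundsEq kConst (app^[48] (toWords c)) (toWords c) _ (by rw [length_app_iter, hwlen]; rfl) hW]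
  have hr8 : PySem.List.pyRange 0 8 1 = [0, 1, 2, 3, 4, 5, 6, 7] := by decide
  rw [hr8]
  simp [pysem, list8]

lemma foldCompress : ∀ (cs : List (List Nat)) (hv : St8), (∀ c ∈ cs, c.length = 64) →
    List.foldl procA (list8 hv) cs = list8 (List.foldl compress hv cs) := by
  intro cs
  induction cs with
  | nil => intro hv _; rfl
  | cons c cs ih =>
    intro hv h
    rw [List.foldl_cons, List.foldl_cons, procA_compress hv c (h c (by simp))]
    exact ih (compress hv c) (fun c' hc' => h c' (by simp [hc']))

lemma main_eq (bs : List Nat) : runA bs = runB bs := by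
  simp only [runA, runB]
  have hpad : padLoop 64 (bs ++ [0x80]) ++ toBytesBE 8 (bs.length * 8)
      = bs ++ 0x80 :: (List.replicate ((120 - (bs.length + 1) % 64) % 64) 0 ++ toBytesBE 8 (bs.length * 8)) := by
    rw [padLoop_eq]
    simp [List.append_assoc]
  rw [hpad]
  set pad : List Nat :=
    bs ++ 0x80 :: (List.replicate ((120 - (bs.length + 1) % 64) % 64) 0 ++ toBytesBE 8 (bs.length * 8))
    with hpadded
  have hlen : pad.length = bs.length + 1 + ((120 - (bs.length + 1) % 64) % 64) + 8 := by
    simp [hpadded, length_toBytesBE]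
    omega
  have hm : pad.length = 64 * (pad.length / 64) := by omega
  have hmpos : 0 < pad.length / 64 := by omega
  have hrange : PySem.List.pyRange 0 (pad.length : Int) 64
      = (List.range (pad.length / 64)).map (fun k => (0 : Int) + 64 * ↑k) := by
    rw [PySem.List.pyRange_of_pos 0 (pad.length : Int) (by norm_num)]
    rw [if_pos (by exact_mod_cast (by omega : 0 < pad.length))]
    congr 2
    omega
  rw [hrange, List.foldl_map]
  have hsl : ∀ k : Nat, PySem.List.slice pad (some ((0 : Int) + 64 * ↑k)) (some ((0 : Int) + 64 * ↑k + 64))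
      = List.take 64 (List.drop (64 * k) pad) := by
    intro k
    have e1 : (0 : Int) + 64 * ↑k = ((64 * k : Nat) : Int) := by push_cast; ring
    have e2 : (0 : Int) + 64 * ↑k + 64 = ((64 * k : Nat) : Int) + ((64 : Nat) : Int) := by push_cast; ring
    rw [e2, e1, PySem.List.slice_natCast_add]
  simp only [hsl]
  rw [show hInit = list8 (0x6a09e667, 0xbb67ae85, 0x3c6ef372, 0xa54ff53a,
        0x510e527f, 0x9b05688c, 0x1f83d9ab, 0x5be0cd19) from rfl,
    chunkFold procA (pad.length / 64) pad _ hm,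
    foldCompress (chunks64 pad) _ (chunks64_len (pad.length / 64) pad hm)]
  rfl

-- ===== VERDICT (by name: the statement is the Claim_ definition above) =====
theorem sha256_custom_spec : Claim_equal_sha256_custom := by
  intro message _
  unfold Spec_sha256_custom
  rw [runA_eq, runB_eq, main_eq]
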